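-- pv_equiv track=rewrite | github.com/WallerTsai/OJ-Solution | leetcode-py/暴力/模拟/No3852.py | minDistinctFreqPair
-- ===== SOURCE A (Python) =====
-- from math import inf
-- from typing import Counter
--
-- def minDistinctFreqPair(nums: list[int]) -> list[int]:
--     cnt = Counter(nums)
--     ans = [inf, inf]
--     for i, x in cnt.items():
--         if i < ans[0] and cnt[ans[0]] == x:
--             ans[0] = i
--         elif i < ans[0] and cnt[ans[0]] != x:
--             ans[0], ans[1] = i, ans[0]
--         elif i < ans[1] and cnt[ans[0]] != x:
--             ans[1] = i
--
--         if ans[0] > ans[1]: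
--             ans[0], ans[1] = ans[1], ans[0]
--
--     return ans if ans[0] != inf and ans[1] != inf else [-1, -1]
-- ===== SOURCE B (Python) =====
-- from collections import Counter
--
-- def minDistinctFreqPair(nums: list[int]) -> list[int]:
--     cnt = Counter(nums)
--     if not cnt:
--         return [-1, -1]
--     m = min(cnt)
--     fm = cnt[m]
--     others = [v for v in cnt if cnt[v] != fm]
--     if not others:
--         return [-1, -1]
--     return [m, min(others)]
-- ===== Notes on version B (the rewrite author's own statement) =====
-- stated objective: simpler
-- what changed: A's single fused scan with an inf-sentinel running pair, four guarded branches and a swap is replaced by a direct decomposition: take m = min of the counter's keys and pair it with the minimum key whose frequency differs from cnt[m], returning [-1,-1] when nums is empty or no such key exists.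
import Mathlib
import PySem

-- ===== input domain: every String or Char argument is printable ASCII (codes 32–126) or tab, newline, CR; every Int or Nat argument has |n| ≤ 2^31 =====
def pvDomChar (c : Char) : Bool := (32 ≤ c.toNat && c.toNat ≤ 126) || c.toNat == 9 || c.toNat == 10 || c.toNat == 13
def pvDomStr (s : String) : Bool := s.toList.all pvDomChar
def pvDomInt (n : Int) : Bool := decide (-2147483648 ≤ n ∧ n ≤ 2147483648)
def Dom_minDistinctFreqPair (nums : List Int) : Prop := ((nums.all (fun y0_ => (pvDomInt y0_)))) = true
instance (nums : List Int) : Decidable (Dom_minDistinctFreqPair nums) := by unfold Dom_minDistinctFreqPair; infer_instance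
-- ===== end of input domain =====

-- B replaces A's fused inf-sentinel running-pair scan by two plain passes (min key, then
-- min key of differing frequency) — objective: simpler decomposition, same O(n) cost.


-- ===== PORT A =====
-- Python's float inf sentinel is modelled by `none` (inf in ans[0]/ans[1] = none);
-- cnt[ans[0]] with ans[0] = inf is a missing-key Counter lookup = 0.
def pvLtInf (i : Int) : Option Int → Bool
  | none => true          -- i < inf
  | some v => i < v

def pvGtInf : Option Int → Option Int → Bool
  | none, none => false   -- inf > inf
  | none, some _ => true  -- inf > v
  | some _, none => false -- u > inf
  | some u, some v => u > v

-- one iteration of A's `for i, x in cnt.items()` body, over state (ans[0], ans[1])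
def pvStepA (cnt : PySem.Dict Int Int) (ans : Option Int × Option Int) (p : Int × Int) :
    Option Int × Option Int :=
  let i := p.1
  let x := p.2
  let c0 : Int := match ans.1 with | none => 0 | some v => cnt.getD v 0  -- cnt[ans[0]]
  let b :=
    if pvLtInf i ans.1 ∧ c0 = x then (some i, ans.2)
    else if pvLtInf i ans.1 ∧ c0 ≠ x then (some i, ans.1)
    else if pvLtInf i ans.2 ∧ c0 ≠ x then (ans.1, some i)
    else ans
  if pvGtInf b.1 b.2 then (b.2, b.1) else b

def minDistinctFreqPair (nums : List Int) : List Int :=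
  let cnt := PySem.Dict.counter nums
  let ans := cnt.items.foldl (pvStepA cnt) (none, none)
  match ans with
  | (some a, some b) => [a, b]
  | _ => [-1, -1]

-- ===== PORT B =====
def minDistinctFreqPair_alt (nums : List Int) : List Int :=
  let cnt := PySem.Dict.counter nums
  if cnt.keys = [] then [-1, -1]
  else
    match PySem.List.min? cnt.keys (fun v => v) with
    | none => [-1, -1]  -- unreachable: keys ≠ []
    | some m =>
      let fm := cnt.getD m 0
      let others := cnt.keys.filter (fun v => cnt.getD v 0 != fm)
      match PySem.List.min? others (fun v => v) with
      | none => [-1, -1]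
      | some s => [m, s]

-- ===== PRECONDITION & SPEC =====
def Spec_minDistinctFreqPair (nums : List Int) (out : List Int) : Prop := out = minDistinctFreqPair_alt nums
instance (nums : List Int) (out : List Int) : Decidable (Spec_minDistinctFreqPair nums out) := by unfold Spec_minDistinctFreqPair; infer_instance

-- ===== CLAIM (what is proved, stated in full; the proofs are below) =====
def Claim_equal_minDistinctFreqPair : Prop := ∀ (nums : List Int), Dom_minDistinctFreqPair nums → Spec_minDistinctFreqPair nums (minDistinctFreqPair nums)

-- ===== LEMMAS AND PROOFS =====

-- the state A's loop maintains after processing keys Q (counts looked up in cnt):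
-- (min of Q, min of the keys of Q whose count differs from the count of min Q)
def pvSpecSt (cnt : PySem.Dict Int Int) (Q : List Int) : Option Int × Option Int :=
  match PySem.List.min? Q (fun v => v) with
  | none => (none, none)
  | some m => (some m, PySem.List.min? (Q.filter (fun v => cnt.getD v 0 != cnt.getD m 0)) (fun v => v))

theorem pv_min_nil : PySem.List.min? ([] : List Int) (fun v => v) = none :=
  (PySem.List.min?_eq_none_iff _ _).mpr rfl

theorem pv_min_append (Q : List Int) (a m : Int)
    (h : PySem.List.min? Q (fun v => v) = some m) :
    PySem.List.min? (Q ++ [a]) (fun v => v) = some (min m a) := by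
  cases Q with
  | nil => rw [pv_min_nil] at h; cases h
  | cons q t =>
    rw [PySem.List.min?_id_cons] at h
    rw [List.cons_append, PySem.List.min?_id_cons, List.foldl_append]
    simp only [List.foldl_cons, List.foldl_nil]
    injection h with h
    rw [h]

theorem pv_min_eq_some (l : List Int) (m : Int) (hm : m ∈ l) (hle : ∀ y ∈ l, m ≤ y) :
    PySem.List.min? l (fun v => v) = some m := by
  cases l with
  | nil => simp at hm
  | cons x t =>
    rw [PySem.List.min?_id_cons]
    have h1 := PySem.List.foldl_min_le t x
    have h2 := PySem.List.foldl_min_mem t x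
    have hvm : t.foldl min x ≤ m := by
      rcases List.mem_cons.mp hm with rfl | hm'
      · exact h1.1
      · exact h1.2 m hm'
    have hmv : m ≤ t.foldl min x := by
      have hmem : t.foldl min x ∈ x :: t := by
        rcases h2 with h | h
        · rw [h]; exact List.mem_cons_self
        · exact List.mem_cons_of_mem x h
      exact hle _ hmem
    have : t.foldl min x = m := le_antisymm hvm hmv
    rw [this]

theorem pvStepA_spec (cnt : PySem.Dict Int Int) (Q : List Int) (a : Int) :
    pvStepA cnt (pvSpecSt cnt Q) (a, cnt.getD a 0) = pvSpecSt cnt (Q ++ [a]) := by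
  cases hQ : PySem.List.min? Q (fun v => v) with
  | none =>
    have hQnil : Q = [] := (PySem.List.min?_eq_none_iff _ _).mp hQ
    subst hQnil
    have hR : pvSpecSt cnt [a] = (some a, none) := by
      unfold pvSpecSt
      rw [show PySem.List.min? [a] (fun v => v) = some a by
        rw [PySem.List.min?_id_cons]; rfl]
      simp [pv_min_nil]
    have hL : pvSpecSt cnt [] = (none, none) := by
      unfold pvSpecSt; rw [pv_min_nil]
    rw [List.nil_append, hR, hL]
    by_cases h0 : (0 : Int) = cnt.getD a 0
    · simp [pvStepA, pvLtInf, pvGtInf, h0.symm]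
    · simp [pvStepA, pvLtInf, pvGtInf, h0]
  | some m =>
    have hmQ : m ∈ Q := PySem.List.min?_mem hQ
    have hmle : ∀ y ∈ Q, m ≤ y := by
      intro y hy; simpa using PySem.List.min?_isMin hQ y hy
    have hm' : PySem.List.min? (Q ++ [a]) (fun v => v) = some (min m a) :=
      pv_min_append Q a m hQ
    have hL : pvSpecSt cnt Q =
        (some m, PySem.List.min? (Q.filter (fun v => cnt.getD v 0 != cnt.getD m 0)) (fun v => v)) := by
      unfold pvSpecSt; rw [hQ]
    have hR : pvSpecSt cnt (Q ++ [a]) =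
        (some (min m a),
          PySem.List.min? ((Q ++ [a]).filter (fun v => cnt.getD v 0 != cnt.getD (min m a) 0)) (fun v => v)) := by
      unfold pvSpecSt; rw [hm']
    rw [hL, hR]
    by_cases hcam : cnt.getD a 0 = cnt.getD m 0
    · -- same count as the current minimum
      by_cases ham : a < m
      · -- new minimum a; the differing-set is unchanged (counts of a and m agree)
        have hmin : min m a = a := by omega
        rw [hmin]
        have hfeq : ((Q ++ [a]).filter (fun v => cnt.getD v 0 != cnt.getD a 0)) =
            Q.filter (fun v => cnt.getD v 0 != cnt.getD m 0) := by
          rw [List.filter_append]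
          simp [hcam]
        rw [hfeq]
        cases hd : PySem.List.min? (Q.filter (fun v => cnt.getD v 0 != cnt.getD m 0)) (fun v => v) with
        | none => simp [pvStepA, pvLtInf, pvGtInf, ham, hcam]
        | some d =>
          have hdQ : d ∈ Q := (List.mem_filter.mp (PySem.List.min?_mem hd)).1
          have had : ¬ (a > d) := by have := hmle d hdQ; omega
          simp [pvStepA, pvLtInf, pvGtInf, ham, hcam, had]
      · -- a ≥ m with equal counts: nothing changes
        have hmin : min m a = m := by omega
        rw [hmin]
        have hfeq : ((Q ++ [a]).filter (fun v => cnt.getD v 0 != cnt.getD m 0)) =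
            Q.filter (fun v => cnt.getD v 0 != cnt.getD m 0) := by
          rw [List.filter_append]
          simp [hcam]
        rw [hfeq]
        have hcma : cnt.getD m 0 = cnt.getD a 0 := hcam.symm
        cases hd : PySem.List.min? (Q.filter (fun v => cnt.getD v 0 != cnt.getD m 0)) (fun v => v) with
        | none => simp [pvStepA, pvLtInf, pvGtInf, ham, hcma]
        | some d =>
          have hdQ : d ∈ Q := (List.mem_filter.mp (PySem.List.min?_mem hd)).1
          have hmd : ¬ (m > d) := by have := hmle d hdQ; omega
          simp [pvStepA, pvLtInf, pvGtInf, ham, hcma, hmd]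
    · -- count of a differs from count of m
      have hcma : ¬ (cnt.getD m 0 = cnt.getD a 0) := fun h => hcam h.symm
      have hanem : a ≠ m := fun h => hcam (h ▸ rfl)
      by_cases ham : a < m
      · -- branch 2: new pair (a, m); min of keys differing from a in Q ++ [a] is m
        have hmin : min m a = a := by omega
        rw [hmin]
        have hfm : PySem.List.min?
            ((Q ++ [a]).filter (fun v => cnt.getD v 0 != cnt.getD a 0)) (fun v => v) = some m := by
          apply pv_min_eq_some
          · rw [List.filter_append]
            refine List.mem_append_left _ (List.mem_filter.mpr ⟨hmQ, ?_⟩)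
            simpa using hcma
          · intro y hy
            have hy' := List.mem_filter.mp hy
            rcases List.mem_append.mp hy'.1 with h | h
            · exact hmle y h
            · exfalso
              have : y = a := by simpa using h
              subst this
              simpa using hy'.2
        rw [hfm]
        have hnam : ¬ (a > m) := by omega
        simp [pvStepA, pvLtInf, pvGtInf, ham, hcma, hnam]
      · -- a > m: minimum stays m, a joins the differing set
        have hma : m < a := by
          have := hmle m hmQ
          rcases lt_or_ge m a with h | h
          · exact h
          · omega
        have hmin : min m a = m := by omega
        rw [hmin]
        have hfeq : ((Q ++ [a]).filter (fun v => cnt.getD v 0 != cnt.getD m 0)) =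
            Q.filter (fun v => cnt.getD v 0 != cnt.getD m 0) ++ [a] := by
          rw [List.filter_append]
          simp [hcam]
        rw [hfeq]
        cases hd : PySem.List.min? (Q.filter (fun v => cnt.getD v 0 != cnt.getD m 0)) (fun v => v) with
        | none =>
          have hF : Q.filter (fun v => cnt.getD v 0 != cnt.getD m 0) = [] :=
            (PySem.List.min?_eq_none_iff _ _).mp hd
          rw [hF, List.nil_append]
          rw [show PySem.List.min? [a] (fun v => v) = some a by
            rw [PySem.List.min?_id_cons]; rfl]
          have hnma : ¬ (m > a) := by omega
          simp [pvStepA, pvLtInf, pvGtInf, ham, hcma]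
        | some d =>
          have hdF := PySem.List.min?_mem hd
          have hdQ : d ∈ Q := (List.mem_filter.mp hdF).1
          have hdm : d ≠ m := by
            intro h; subst h
            have := (List.mem_filter.mp hdF).2
            simp at this
          have hmd : m < d := by have := hmle d hdQ; omega
          rw [pv_min_append _ a d hd]
          by_cases hlt : a < d
          · have hda : min d a = a := by omega
            rw [hda]
            have hnma : ¬ (m > a) := by omega
            simp [pvStepA, pvLtInf, pvGtInf, ham, hcma, hlt]
          · have hda : min d a = d := by omega
            rw [hda]
            have hnmd : ¬ (m > d) := by omega
            simp [pvStepA, pvLtInf, pvGtInf, ham, hcma, hlt, hnmd]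

theorem pv_foldl_spec (cnt : PySem.Dict Int Int) (L : List (Int × Int)) :
    ∀ Q : List Int, (∀ p ∈ L, p.2 = cnt.getD p.1 0) →
    L.foldl (pvStepA cnt) (pvSpecSt cnt Q) = pvSpecSt cnt (Q ++ L.map Prod.fst) := by
  induction L with
  | nil => intro Q _; simp
  | cons p t ih =>
    intro Q hL
    have hp : p = (p.1, cnt.getD p.1 0) := Prod.ext rfl (hL p (by simp))
    rw [List.foldl_cons, hp, pvStepA_spec cnt Q p.1,
      ih (Q ++ [p.1]) (fun q hq => hL q (by simp [hq]))]
    simp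

theorem minDistinctFreqPair_eq_alt (nums : List Int) :
    minDistinctFreqPair nums = minDistinctFreqPair_alt nums := by
  unfold minDistinctFreqPair minDistinctFreqPair_alt
  simp only []
  have hitems : ∀ p ∈ (PySem.Dict.counter nums).items,
      p.2 = (PySem.Dict.counter nums).getD p.1 0 := by
    intro p hp
    rw [PySem.Dict.items_counter] at hp
    rcases List.mem_map.mp hp with ⟨k, _, hk⟩
    rw [← hk]
    simp [PySem.Dict.getD_counter]
  have hkeys : (PySem.Dict.counter nums).items.map Prod.fst = (PySem.Dict.counter nums).keys := by
    simp [PySem.Dict.keys]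
  have hinit : pvSpecSt (PySem.Dict.counter nums) [] = (none, none) := by
    unfold pvSpecSt; rw [pv_min_nil]
  have hfold := pv_foldl_spec (PySem.Dict.counter nums) (PySem.Dict.counter nums).items [] hitems
  rw [hinit, List.nil_append, hkeys] at hfold
  rw [hfold]
  unfold pvSpecSt
  cases hm : PySem.List.min? (PySem.Dict.counter nums).keys (fun v => v) with
  | none =>
    have : (PySem.Dict.counter nums).keys = [] := (PySem.List.min?_eq_none_iff _ _).mp hm
    simp [this]
  | some m =>
    have hne : ¬ ((PySem.Dict.counter nums).keys = []) := by
      intro h; rw [h, pv_min_nil] at hm; cases hm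
    simp only [hne, if_false]
    cases hd : PySem.List.min?
        ((PySem.Dict.counter nums).keys.filter
          (fun v => (PySem.Dict.counter nums).getD v 0 != (PySem.Dict.counter nums).getD m 0))
        (fun v => v) with
    | none => simp
    | some s => simp

-- ===== VERDICT (by name: the statement is the Claim_ definition above) =====
theorem minDistinctFreqPair_spec : Claim_equal_minDistinctFreqPair := by
  intro nums _
  unfold Spec_minDistinctFreqPair
  exact minDistinctFreqPair_eq_alt nums
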